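-- pv_equiv track=rewrite | github.com/yanghz416/VHbbccPoCo | MVA/training.py | get_background_abbreviation
-- ===== SOURCE A (Python) =====
-- def get_background_abbreviation(background_names):
--     abbreviations = []
--     if any('DY' in name or 'dy' in name for name in background_names):
--         abbreviations.append('DY')
--     if any('TT' in name or 'tt' in name for name in background_names):
--         abbreviations.append('TT')
--     if any('QCD' in name or 'qcd' in name for name in background_names):
--         abbreviations.append('QCD')
--     if not abbreviations:  # If no specific backgrounds were found, consider it as 'Other Backgrounds'
--         return 'OB'
--     return '_'.join(abbreviations)
-- ===== SOURCE B (Python) =====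
-- def get_background_abbreviation(background_names):
--     has_dy = has_tt = has_qcd = False
--     for name in background_names:
--         if 'DY' in name or 'dy' in name:
--             has_dy = True
--         if 'TT' in name or 'tt' in name:
--             has_tt = True
--         if 'QCD' in name or 'qcd' in name:
--             has_qcd = True
--     abbreviations = [a for a, f in (('DY', has_dy), ('TT', has_tt), ('QCD', has_qcd)) if f]
--     return '_'.join(abbreviations) if abbreviations else 'OB'
-- ===== Notes on version B (the rewrite author's own statement) =====
-- stated objective: alternative
-- what changed: B replaces A's three separate any()-scans over the list with a single pass maintaining three boolean flags, assembling the abbreviation list afterwards in the fixed DY/TT/QCD order.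
import Mathlib
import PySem

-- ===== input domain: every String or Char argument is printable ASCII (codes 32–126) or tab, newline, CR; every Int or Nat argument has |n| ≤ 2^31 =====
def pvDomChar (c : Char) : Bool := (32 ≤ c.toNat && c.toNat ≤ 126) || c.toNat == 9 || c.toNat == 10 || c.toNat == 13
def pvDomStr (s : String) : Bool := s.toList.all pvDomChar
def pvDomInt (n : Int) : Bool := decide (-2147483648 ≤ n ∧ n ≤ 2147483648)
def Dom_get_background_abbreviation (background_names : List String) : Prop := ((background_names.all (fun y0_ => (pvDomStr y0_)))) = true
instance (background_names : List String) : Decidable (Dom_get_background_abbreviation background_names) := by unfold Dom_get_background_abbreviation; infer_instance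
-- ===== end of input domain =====

-- ===== PORT A =====
def get_background_abbreviation (background_names : List String) : String :=
  let abbreviations : List String := []
  let abbreviations :=
    if background_names.any (fun name => PySem.Str.isIn "DY" name || PySem.Str.isIn "dy" name)
    then abbreviations ++ ["DY"] else abbreviations
  let abbreviations :=
    if background_names.any (fun name => PySem.Str.isIn "TT" name || PySem.Str.isIn "tt" name)
    then abbreviations ++ ["TT"] else abbreviations
  let abbreviations :=
    if background_names.any (fun name => PySem.Str.isIn "QCD" name || PySem.Str.isIn "qcd" name)
    then abbreviations ++ ["QCD"] else abbreviations
  if abbreviations = [] then "OB" else PySem.Str.join "_" abbreviations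

-- ===== PORT B =====
def get_background_abbreviation_alt (background_names : List String) : String :=
  let flags := background_names.foldl
    (fun (f : Bool × Bool × Bool) name =>
      (f.1 || PySem.Str.isIn "DY" name || PySem.Str.isIn "dy" name,
       f.2.1 || PySem.Str.isIn "TT" name || PySem.Str.isIn "tt" name,
       f.2.2 || PySem.Str.isIn "QCD" name || PySem.Str.isIn "qcd" name))
    (false, false, false)
  let abbreviations :=
    (if flags.1 then ["DY"] else []) ++ (if flags.2.1 then ["TT"] else []) ++
    (if flags.2.2 then ["QCD"] else [])
  if abbreviations = [] then "OB" else PySem.Str.join "_" abbreviations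

-- ===== PRECONDITION & SPEC =====
def Spec_get_background_abbreviation (background_names : List String) (out : String) : Prop := out = get_background_abbreviation_alt background_names
instance (background_names : List String) (out : String) : Decidable (Spec_get_background_abbreviation background_names out) := by unfold Spec_get_background_abbreviation; infer_instance

-- ===== CLAIM (what is proved, stated in full; the proofs are below) =====
def Claim_equal_get_background_abbreviation : Prop := ∀ (background_names : List String), Dom_get_background_abbreviation background_names → Spec_get_background_abbreviation background_names (get_background_abbreviation background_names)

-- ===== LEMMAS AND PROOFS =====
-- B fuses A's three any-scans into one flag-maintaining pass; same return value, alternative decomposition.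

-- the fused fold computes the disjunction of the three any-scans componentwise
theorem flags_eq (p1 p2 q1 q2 r1 r2 : String → Bool) (ns : List String) (a b c : Bool) :
    ns.foldl (fun (f : Bool × Bool × Bool) n =>
      (f.1 || p1 n || p2 n, f.2.1 || q1 n || q2 n, f.2.2 || r1 n || r2 n)) (a, b, c)
      = (a || ns.any (fun n => p1 n || p2 n), b || ns.any (fun n => q1 n || q2 n),
         c || ns.any (fun n => r1 n || r2 n)) := by
  induction ns generalizing a b c with
  | nil => simp
  | cons x xs ih => rw [List.foldl_cons, ih]; simp [Bool.or_assoc]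

theorem get_background_abbreviation_spec : Claim_equal_get_background_abbreviation := by
  intro ns _
  unfold Spec_get_background_abbreviation get_background_abbreviation get_background_abbreviation_alt
  simp only [flags_eq, Bool.false_or]
  rcases h1 : ns.any (fun name => PySem.Str.isIn "DY" name || PySem.Str.isIn "dy" name) <;>
  rcases h2 : ns.any (fun name => PySem.Str.isIn "TT" name || PySem.Str.isIn "tt" name) <;>
  rcases h3 : ns.any (fun name => PySem.Str.isIn "QCD" name || PySem.Str.isIn "qcd" name) <;>
    simp
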